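-- pv_equiv track=rewrite | github.com/diyorbekbaxromovv/Python-5-month-NT | 7-lesson selection sort/homework/ex1.py | add_function
-- ===== SOURCE A (Python) =====
-- def add_function(numlist):
--     seen = {}
--     result = []
--
--     for i, item in enumerate(reversed(numlist)):
--         if item in seen:
--             result.insert(0, '_')
--         else:
--             result.insert(0, item)
--             seen[item] = i
--
--     return result
-- ===== SOURCE B (Python) =====
-- def add_function(numlist):
--     counts = {}
--     for item in numlist:
--         counts[item] = counts.get(item, 0) + 1
--     out = []
--     for item in numlist:
--         counts[item] -= 1
--         out.append('_' if counts[item] > 0 else item)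
--     return out
-- ===== Notes on version B (the rewrite author's own statement) =====
-- stated objective: faster
-- what changed: A walks the reversed list with a seen-dict and inserts each result at position 0; B first builds a count table in one forward pass, then walks forward decrementing counts and appends '_' exactly when a later occurrence remains, so no reversal and no front-insertion.
import Mathlib
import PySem

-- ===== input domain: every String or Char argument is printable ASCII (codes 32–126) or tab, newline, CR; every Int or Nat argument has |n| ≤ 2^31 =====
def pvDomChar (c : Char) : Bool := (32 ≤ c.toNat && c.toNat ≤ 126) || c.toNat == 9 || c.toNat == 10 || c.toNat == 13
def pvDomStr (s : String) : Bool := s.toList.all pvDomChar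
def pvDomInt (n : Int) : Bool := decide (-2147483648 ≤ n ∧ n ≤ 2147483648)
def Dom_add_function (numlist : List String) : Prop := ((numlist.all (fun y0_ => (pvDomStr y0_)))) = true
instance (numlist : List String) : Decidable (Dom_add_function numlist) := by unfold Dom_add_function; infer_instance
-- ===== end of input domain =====

-- B replaces A's reversed walk + seen-dict + insert(0) by a count table built first and a
-- forward pass that decrements counts (simpler: no reversal, no front-insertion, O(n)).

-- ===== PORT A =====
-- for i, item in enumerate(reversed(numlist)): membership test in seen, insert(0, ...)
def add_function (numlist : List String) : List String :=
  (((PySem.List.enumerate numlist.reverse 0).foldl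
    (fun (st : PySem.Dict String Int × List String) p =>
      if st.1.contains p.2 then (st.1, "_" :: st.2)
      else (st.1.insert p.2 p.1, p.2 :: st.2))
    (PySem.Dict.empty, []))).2

-- ===== PORT B =====
-- first loop: counts[item] = counts.get(item, 0) + 1; second loop: counts[item] -= 1, append
def add_function_alt (numlist : List String) : List String :=
  let counts : PySem.Dict String Int :=
    numlist.foldl (fun d x => d.insert x (d.getD x 0 + 1)) PySem.Dict.empty
  (numlist.foldl
    (fun (st : PySem.Dict String Int × List String) item =>
      let c := st.1.modify item 0 (· - 1)
      (c, st.2 ++ [if c.getD item 0 > 0 then "_" else item]))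
    (counts, [])).2

-- ===== PRECONDITION & SPEC =====
def Spec_add_function (numlist : List String) (out : List String) : Prop := out = add_function_alt numlist
instance (numlist : List String) (out : List String) : Decidable (Spec_add_function numlist out) := by unfold Spec_add_function; infer_instance

-- ===== CLAIM (what is proved, stated in full; the proofs are below) =====
def Claim_equal_add_function : Prop := ∀ (numlist : List String), Dom_add_function numlist → Spec_add_function numlist (add_function numlist)

-- ===== LEMMAS AND PROOFS =====

-- common spec: keep the last occurrence of each value, replace earlier ones by "_"
def lastMark : List String → List String
  | [] => []
  | x :: rest => (if x ∈ rest then "_" else x) :: lastMark rest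

-- A's fold step
def stepA (st : PySem.Dict String Int × List String) (p : Int × String) :
    PySem.Dict String Int × List String :=
  if st.1.contains p.2 then (st.1, "_" :: st.2)
  else (st.1.insert p.2 p.1, p.2 :: st.2)

-- A's fold over the reversed list: seen holds exactly the elements of xs, result is lastMark xs
theorem foldA_inv (xs : List String) :
    (∀ y, ((PySem.List.enumerate xs.reverse 0).foldl stepA (PySem.Dict.empty, [])).1.contains y = true ↔ y ∈ xs) ∧
    ((PySem.List.enumerate xs.reverse 0).foldl stepA (PySem.Dict.empty, [])).2 = lastMark xs := by
  induction xs with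
  | nil => simp [lastMark, PySem.Dict.contains, PySem.Dict.empty]
  | cons x xs ih =>
    have hrev : (x :: xs).reverse = xs.reverse ++ [x] := by simp
    rw [hrev, PySem.List.enumerate_append, List.foldl_append]
    obtain ⟨ihc, ihr⟩ := ih
    simp only [PySem.List.enumerate, List.foldl]
    set st := (PySem.List.enumerate xs.reverse 0).foldl stepA (PySem.Dict.empty, []) with hst
    by_cases hx : x ∈ xs
    · have hc : st.1.contains x = true := (ihc x).mpr hx
      refine ⟨fun y => ?_, by simp [stepA, hc, ihr, lastMark, hx]⟩
      simp only [stepA, hc, if_true]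
      rw [ihc y, List.mem_cons]
      exact ⟨Or.inr, fun h => h.elim (fun h => h ▸ hx) id⟩
    · have hc : st.1.contains x = false := by
        rcases h : st.1.contains x with _ | _
        · rfl
        · exact absurd ((ihc x).mp h) hx
      refine ⟨fun y => ?_, by simp [stepA, hc, ihr, lastMark, hx]⟩
      simp only [stepA, hc, Bool.false_eq_true, if_false]
      rw [PySem.Dict.contains_insert, List.mem_cons, Bool.or_eq_true, beq_iff_eq, ihc y]

-- B's decrement pass
def stepB (st : PySem.Dict String Int × List String) (item : String) :
    PySem.Dict String Int × List String :=
  let c := st.1.modify item 0 (· - 1)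
  (c, st.2 ++ [if c.getD item 0 > 0 then "_" else item])

theorem foldB_inv (l : List String) : ∀ (d : PySem.Dict String Int) (acc : List String),
    (∀ y, d.getD y 0 = (l.count y : Int)) →
    (l.foldl stepB (d, acc)).2 = acc ++ lastMark l := by
  induction l with
  | nil => intro d acc _; simp [lastMark]
  | cons x rest ih =>
    intro d acc hd
    simp only [List.foldl]
    have hx : (d.modify x 0 (· - 1)).getD x 0 = (rest.count x : Int) := by
      rw [PySem.Dict.getD_modify_self, hd x]
      simp
    have hinv : ∀ y, (d.modify x 0 (· - 1)).getD y 0 = (rest.count y : Int) := by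
      intro y
      by_cases hyx : y = x
      · subst hyx; exact hx
      · rw [PySem.Dict.getD_modify, if_neg hyx, hd y]
        simp [Ne.symm hyx]
    have hcond : ((d.modify x 0 (· - 1)).getD x 0 > 0) ↔ x ∈ rest := by
      rw [hx]
      exact_mod_cast List.count_pos_iff (l := rest)
    have hcnd : (if (d.modify x 0 (· - 1)).getD x 0 > 0 then "_" else x)
        = (if x ∈ rest then "_" else x) := by
      by_cases hmem : x ∈ rest
      · rw [if_pos (hcond.mpr hmem), if_pos hmem]
      · rw [if_neg (fun h => hmem (hcond.mp h)), if_neg hmem]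
    show (rest.foldl stepB (d.modify x 0 (· - 1),
        acc ++ [if (d.modify x 0 (· - 1)).getD x 0 > 0 then "_" else x])).2
        = acc ++ lastMark (x :: rest)
    rw [ih _ _ hinv, hcnd, lastMark]
    simp

theorem counts_init (numlist : List String) (y : String) :
    (numlist.foldl (fun d x => d.insert x (d.getD x 0 + 1)) PySem.Dict.empty).getD y 0
      = (numlist.count y : Int) := by
  rw [PySem.Dict.foldl_insert_getD_add_one_eq_counter, PySem.Dict.getD_counter]

-- ===== VERDICT (by name: the statement is the Claim_ definition above) =====
theorem add_function_spec : Claim_equal_add_function := by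
  intro numlist _
  show add_function numlist = add_function_alt numlist
  have hA : add_function numlist = lastMark numlist := (foldA_inv numlist).2
  have hB := foldB_inv numlist
    (numlist.foldl (fun d x => d.insert x (d.getD x 0 + 1)) PySem.Dict.empty) []
    (counts_init numlist)
  rw [List.nil_append] at hB
  exact hA.trans hB.symm
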